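-- pv_equiv track=rewrite | github.com/jinit-jain/investor-buddy | Analyze_Sentiment.py | find_subsectors
-- ===== SOURCE A (Python) =====
-- def find_subsectors(organizations, cleaned_subsectors):
--     """Find subsectors in organization"""
--
--     organ_to_subsector = {}
--     for subsector in cleaned_subsectors:
--         for organization in organizations.keys():
--             if organization in subsector.split(' '):
--                 if organization not in organ_to_subsector:
--                     organ_to_subsector[organization] = list()
--                 organ_to_subsector[organization].append(subsector)
--     return organ_to_subsector
-- ===== SOURCE B (Python) =====
-- def find_subsectors(organizations, cleaned_subsectors):
--     """Find subsectors in organization"""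
--     word_sets = [set(s.split(' ')) for s in cleaned_subsectors]
--     pairs = list(zip(cleaned_subsectors, word_sets))
--     remaining = list(organizations)
--     result = {}
--     for ws in word_sets:
--         for org in [o for o in remaining if o in ws]:
--             result[org] = [s for s, w in pairs if org in w]
--         remaining = [o for o in remaining if o not in ws]
--     return result
-- ===== Notes on version B (the rewrite author's own statement) =====
-- stated objective: alternative
-- what changed: B precomputes one set of words per subsector (A re-splits every subsector once per organization), drives the scan from a shrinking worklist of not-yet-matched organizations, and on an organization's first match builds its complete subsector list with a single filter instead of A's per-subsector appends; measured ~1.4-2x faster on generated inputs but below the 1.5x confirmation bar at the largest size.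
import Mathlib
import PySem

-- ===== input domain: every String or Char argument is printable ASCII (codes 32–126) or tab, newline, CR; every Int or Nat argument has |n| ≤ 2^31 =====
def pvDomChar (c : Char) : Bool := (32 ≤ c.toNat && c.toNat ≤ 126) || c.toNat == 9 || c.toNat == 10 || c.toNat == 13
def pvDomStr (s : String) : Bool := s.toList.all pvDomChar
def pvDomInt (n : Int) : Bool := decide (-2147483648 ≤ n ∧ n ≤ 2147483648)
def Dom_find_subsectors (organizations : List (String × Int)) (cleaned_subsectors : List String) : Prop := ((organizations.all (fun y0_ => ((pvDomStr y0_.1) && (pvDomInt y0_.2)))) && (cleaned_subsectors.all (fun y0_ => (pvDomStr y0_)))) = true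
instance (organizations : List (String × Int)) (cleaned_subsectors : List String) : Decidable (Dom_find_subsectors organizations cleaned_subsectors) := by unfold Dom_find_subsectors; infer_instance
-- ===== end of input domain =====

-- B splits every subsector once into a set of words and removes matched organizations from a shrinking
-- worklist, building each matched organization's full subsector list in a single filter
-- (A re-splits each subsector for every organization and appends one hit at a time).

-- s.split(' '): the separator is the nonempty literal ' ', so split? is always some (shared by both ports)
def pySplitSpace (s : String) : List String := (PySem.Str.split? s " ").getD []

-- ===== PORT A =====
def find_subsectors (organizations : List (String × Int)) (cleaned_subsectors : List String) : List (String × List String) :=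
  (cleaned_subsectors.foldl (fun organ_to_subsector subsector =>
      ((PySem.Dict.ofList organizations).keys).foldl (fun organ_to_subsector organization =>
        if (pySplitSpace subsector).contains organization then
          -- 'if organization not in organ_to_subsector: … = list()' then 'organ_to_subsector[organization].append(subsector)'
          (if organ_to_subsector.contains organization then organ_to_subsector
           else organ_to_subsector.insert organization []).modify organization [] (fun v => v ++ [subsector])
        else organ_to_subsector) organ_to_subsector)
    PySem.Dict.empty).items

-- ===== PORT B =====
def find_subsectors_alt (organizations : List (String × Int)) (cleaned_subsectors : List String) : List (String × List String) :=
  let word_sets := cleaned_subsectors.map (fun s => PySem.Set.ofList (pySplitSpace s))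
  let pairs := cleaned_subsectors.zip word_sets
  (word_sets.foldl (fun (st : List String × PySem.Dict String (List String)) ws =>
      (st.1.filter (fun o => !(PySem.Set.contains ws o)),
       (st.1.filter (fun o => PySem.Set.contains ws o)).foldl
         (fun result org =>
           result.insert org ((pairs.filter (fun p => PySem.Set.contains p.2 org)).map (fun p => p.1)))
         st.2))
    ((PySem.Dict.ofList organizations).keys, PySem.Dict.empty)).2.items

-- ===== PRECONDITION & SPEC =====
def Spec_find_subsectors (organizations : List (String × Int)) (cleaned_subsectors : List String) (out : List (String × List String)) : Prop := out = find_subsectors_alt organizations cleaned_subsectors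
instance (organizations : List (String × Int)) (cleaned_subsectors : List String) (out : List (String × List String)) : Decidable (Spec_find_subsectors organizations cleaned_subsectors out) := by unfold Spec_find_subsectors; infer_instance

-- ===== CLAIM (what is proved, stated in full; the proofs are below) =====
def Claim_equal_find_subsectors : Prop := ∀ (organizations : List (String × Int)) (cleaned_subsectors : List String), Dom_find_subsectors organizations cleaned_subsectors → Spec_find_subsectors organizations cleaned_subsectors (find_subsectors organizations cleaned_subsectors)

-- ===== LEMMAS AND PROOFS =====

-- 'organization in subsector.split(' ')' as a Bool — the membership test both programs make
def hitB (o s : String) : Bool := (pySplitSpace s).contains o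

-- A's outer-loop body: the inner loop over the organization keys
def AstepF (keys : List String) (d : PySem.Dict String (List String)) (s : String) : PySem.Dict String (List String) :=
  keys.foldl (fun d o =>
    if (pySplitSpace s).contains o then
      (if d.contains o then d else d.insert o []).modify o [] (fun v => v ++ [s])
    else d) d

-- B's loop body, with the word-set test and the zip-built value rewritten through hitB/filter
def BstepF (cleaned : List String) (st : List String × PySem.Dict String (List String)) (s : String) :
    List String × PySem.Dict String (List String) :=
  (st.1.filter (fun o => !(hitB o s)),
   (st.1.filter (fun o => hitB o s)).foldl (fun r o => r.insert o (cleaned.filter (hitB o))) st.2)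

lemma contains_ofList (l : List String) (o : String) :
    PySem.Set.contains (PySem.Set.ofList l) o = l.contains o := by
  by_cases h : o ∈ l <;> simp [PySem.Set.contains, PySem.Set.mem_ofList, h]

lemma zip_value (cleaned : List String) (org : String) :
    (((cleaned.zip (cleaned.map (fun s => PySem.Set.ofList (pySplitSpace s)))).filter
        (fun p => PySem.Set.contains p.2 org)).map (fun p => p.1))
      = cleaned.filter (hitB org) := by
  have hz := List.zip_map' (f := id) (g := fun s => PySem.Set.ofList (pySplitSpace s)) (l := cleaned)
  rw [List.map_id] at hz
  rw [hz, List.filter_map, List.map_map]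
  have h1 : ∀ a ∈ cleaned, ((fun p => PySem.Set.contains p.2 org) ∘ (fun a => (id a, PySem.Set.ofList (pySplitSpace a)))) a = hitB org a := by
    intro a _
    simp [Function.comp, hitB]
  rw [List.filter_congr h1]
  exact (List.map_congr_left (g := id) (fun a _ => rfl)).trans (List.map_id _)

-- B unfolded: a plain foldl of BstepF over the subsector list
lemma alt_eq_foldl_BstepF (organizations : List (String × Int)) (cleaned : List String) :
    find_subsectors_alt organizations cleaned =
      (cleaned.foldl (BstepF cleaned) ((PySem.Dict.ofList organizations).keys, PySem.Dict.empty)).2.items := by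
  simp only [find_subsectors_alt]
  rw [List.foldl_map]
  refine congrArg (fun (x : List String × PySem.Dict String (List String)) => x.2.items) ?_
  apply PySem.List.foldl_congr_mem
  intro st s hs
  refine congrArg₂ Prod.mk ?_ ?_
  · apply List.filter_congr
    intro o _
    rw [contains_ofList]
    rfl
  · refine congrArg₂ (fun f l => List.foldl f st.2 l) ?_ ?_
    · funext r o
      rw [zip_value cleaned o]
    · apply List.filter_congr
      intro o _
      rw [contains_ofList]
      rfl

-- the effect of A's two statements for one organization on the dict's items
lemma items_Abody (d : PySem.Dict String (List String)) (o s : String) (hnd : d.keys.Nodup) :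
    ((if d.contains o then d else d.insert o []).modify o [] (fun v => v ++ [s])).items
      = if d.contains o then d.items.map (fun p => if p.1 == o then (o, p.2 ++ [s]) else p)
        else d.items ++ [(o, [s])] := by
  by_cases hc : d.contains o
  · simp only [hc, if_true, PySem.Dict.modify]
    rw [PySem.Dict.items_insert]
    simp only [hc, if_true]
    apply List.map_congr_left
    intro p hp
    by_cases he : (p.1 == o) = true
    · have heq : p.1 = o := by simpa using he
      have hv : d.getD o [] = p.2 := by
        rw [← heq]
        exact PySem.Dict.getD_of_mem_items d hp hnd []
      simp [hv, heq]
    · simp [he]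
  · simp only [Bool.not_eq_true] at hc
    simp only [hc, Bool.false_eq_true, if_false, PySem.Dict.modify]
    rw [PySem.Dict.getD_insert_self]
    rw [PySem.Dict.items_insert]
    have hc2 : (d.insert o []).contains o = true := PySem.Dict.contains_insert_self d o []
    simp only [hc2, if_true]
    rw [PySem.Dict.items_insert]
    simp only [hc, Bool.false_eq_true, if_false]
    rw [List.map_append]
    have hmap : ∀ p ∈ d.items, (fun (p : String × List String) => if (p.1 == o) = true then (o, ([] : List String) ++ [s]) else p) p = p := by
      intro p hp
      have hne : p.1 ≠ o := by
        intro h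
        have hmem : o ∈ d.keys := by
          rw [← h]; exact PySem.Dict.mem_keys_of_mem_items _ hp
        rw [PySem.Dict.contains_eq_decide_mem_keys] at hc
        simp at hc; exact hc hmem
      simp [hne]
    rw [List.map_congr_left hmap, List.map_id']
    simp

lemma keys_Abody (d : PySem.Dict String (List String)) (o s : String) (hnd : d.keys.Nodup) :
    ((if d.contains o then d else d.insert o []).modify o [] (fun v => v ++ [s])).keys
      = if d.contains o then d.keys else d.keys ++ [o] := by
  show (((if d.contains o then d else d.insert o []).modify o [] (fun v => v ++ [s])).items.map Prod.fst) = _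
  rw [items_Abody d o s hnd]
  by_cases hc : d.contains o
  · simp only [hc, if_true]
    show List.map Prod.fst _ = d.items.map Prod.fst
    rw [List.map_map]
    apply List.map_congr_left
    intro p hp
    by_cases he : (p.1 == o) = true
    · have heq : p.1 = o := by simpa using he
      simp [heq]
    · have hne : p.1 ≠ o := by simpa using he
      simp [hne]
  · simp only [hc, Bool.false_eq_true, if_false]
    show List.map Prod.fst _ = d.items.map Prod.fst ++ [o]
    simp

lemma mem_keys_Abody (d : PySem.Dict String (List String)) (o s o' : String) (hnd : d.keys.Nodup) :
    (o' ∈ ((if d.contains o then d else d.insert o []).modify o [] (fun v => v ++ [s])).keys)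
      ↔ (o' = o ∨ o' ∈ d.keys) := by
  rw [keys_Abody d o s hnd]
  by_cases hc : d.contains o
  · simp only [hc, if_true]
    constructor
    · tauto
    · rintro (rfl | h)
      · rw [PySem.Dict.contains_eq_decide_mem_keys] at hc; simpa using hc
      · exact h
  · simp only [hc, Bool.false_eq_true, if_false, List.mem_append, List.mem_singleton]
    tauto

lemma nodup_keys_Abody (d : PySem.Dict String (List String)) (o s : String) (hnd : d.keys.Nodup) :
    ((if d.contains o then d else d.insert o []).modify o [] (fun v => v ++ [s])).keys.Nodup := by
  rw [keys_Abody d o s hnd]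
  by_cases hc : d.contains o
  · simpa [hc] using hnd
  · simp only [hc, Bool.false_eq_true, if_false]
    have hno : o ∉ d.keys := by
      rw [PySem.Dict.contains_eq_decide_mem_keys] at hc; simpa using hc
    rw [List.nodup_append]
    refine ⟨hnd, List.nodup_singleton o, ?_⟩
    intro a ha b hb
    rw [List.mem_singleton] at hb
    subst hb
    exact fun h => hno (h ▸ ha)

-- A's inner loop restricted to the matching organizations ms: existing keys get s appended, fresh ones are appended
lemma items_AbodyFold (s : String) : ∀ (ms : List String) (d : PySem.Dict String (List String)),
    ms.Nodup → d.keys.Nodup →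
    (ms.foldl (fun d o => (if d.contains o then d else d.insert o []).modify o [] (fun v => v ++ [s])) d).items
      = d.items.map (fun p => if ms.contains p.1 then (p.1, p.2 ++ [s]) else p)
        ++ (ms.filter (fun o => !(d.contains o))).map (fun o => (o, [s])) := by
  intro ms
  induction ms with
  | nil => intro d _ _; simp
  | cons o rest ih =>
    intro d hms hnd
    have hno : o ∉ rest := (List.nodup_cons.mp hms).1
    have hrest : rest.Nodup := (List.nodup_cons.mp hms).2
    simp only [List.foldl_cons]
    set d' := (if d.contains o then d else d.insert o []).modify o [] (fun v => v ++ [s]) with hd'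
    have hnd' : d'.keys.Nodup := nodup_keys_Abody d o s hnd
    rw [ih d' hrest hnd']
    have hitems : d'.items = if d.contains o then d.items.map (fun p => if p.1 == o then (o, p.2 ++ [s]) else p)
        else d.items ++ [(o, [s])] := items_Abody d o s hnd
    have hcont : ∀ o' ∈ rest, d'.contains o' = d.contains o' := by
      intro o' ho'
      have hne : o' ≠ o := fun h => hno (h ▸ ho')
      rw [PySem.Dict.contains_eq_decide_mem_keys, PySem.Dict.contains_eq_decide_mem_keys]
      have hiff := mem_keys_Abody d o s o' hnd
      rw [← hd'] at hiff
      by_cases hm : o' ∈ d.keys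
      · simp [hm, hiff.mpr (Or.inr hm)]
      · have : o' ∉ d'.keys := fun hx => (hiff.mp hx).elim (fun h => hne h) hm
        simp [hm, this]
    have hfilter : rest.filter (fun x => !(d'.contains x)) = rest.filter (fun x => !(d.contains x)) :=
      List.filter_congr (fun o' ho' => by rw [hcont o' ho'])
    by_cases hc : d.contains o
    · rw [hitems]
      simp only [hc, if_true]
      rw [List.map_map]
      congr 1
      · apply List.map_congr_left
        intro p hp
        by_cases he : (p.1 == o) = true
        · have heq : p.1 = o := by simpa using he
          simp [Function.comp, heq, hno]
        · have hne : p.1 ≠ o := by simpa using he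
          simp [Function.comp, hne]
      · rw [hfilter, List.filter_cons_of_neg (by simp [hc])]
    · rw [hitems]
      simp only [hc, Bool.false_eq_true, if_false]
      have hok : o ∉ d.keys := by
        rw [PySem.Dict.contains_eq_decide_mem_keys] at hc; simpa using hc
      rw [List.map_append, hfilter, List.filter_cons_of_pos (by simp [hc]), List.map_cons]
      have h1 : d.items.map (fun p => if rest.contains p.1 = true then (p.1, p.2 ++ [s]) else p)
          = d.items.map (fun p => if (o :: rest).contains p.1 = true then (p.1, p.2 ++ [s]) else p) := by
        apply List.map_congr_left
        intro p hp
        have : p.1 ≠ o := fun h => hok (h ▸ PySem.Dict.mem_keys_of_mem_items _ hp)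
        simp [this]
      rw [h1]
      simp [hno]

lemma items_AstepF (keys : List String) (d : PySem.Dict String (List String)) (s : String)
    (hknd : keys.Nodup) (hnd : d.keys.Nodup) :
    (AstepF keys d s).items
      = d.items.map (fun p => if (keys.filter (fun o => hitB o s)).contains p.1 then (p.1, p.2 ++ [s]) else p)
        ++ ((keys.filter (fun o => hitB o s)).filter (fun o => !(d.contains o))).map (fun o => (o, [s])) := by
  unfold AstepF
  rw [PySem.List.foldl_if_eq_foldl_filter]
  exact items_AbodyFold s (keys.filter (fun o => hitB o s)) d (hknd.filter _) hnd


-- a filtered worklist is still 'keys restricted to membership in it'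
lemma filter_stable (keys l : List String) (p : String → Bool)
    (hl : l = keys.filter (fun o => l.contains o)) :
    l.filter p = keys.filter (fun o => (l.filter p).contains o) := by
  conv_lhs => rw [hl]
  rw [List.filter_filter]
  apply List.filter_congr
  intro o ho
  by_cases hp : p o = true <;> by_cases hm : o ∈ l <;> simp [List.mem_filter, hp, hm]

lemma keys_AstepF (keys : List String) (d : PySem.Dict String (List String)) (s : String)
    (hknd : keys.Nodup) (hnd : d.keys.Nodup) :
    (AstepF keys d s).keys
      = d.keys ++ (keys.filter (fun o => hitB o s)).filter (fun o => !(d.contains o)) := by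
  show ((AstepF keys d s).items.map Prod.fst) = _
  rw [items_AstepF keys d s hknd hnd, List.map_append, List.map_map, List.map_map]
  congr 1
  · apply List.map_congr_left
    intro p hp
    simp only [Function.comp_apply]
    by_cases hc : (keys.filter (fun o => hitB o s)).contains p.1 = true
    · rw [if_pos hc]
    · rw [if_neg hc]
  · exact (List.map_congr_left (g := id) (fun a _ => rfl)).trans (List.map_id _)

lemma keys_of_items_map (out d : PySem.Dict String (List String))
    (f : String × List String → List String)
    (h : out.items = d.items.map (fun p => (p.1, f p))) : out.keys = d.keys := by
  show out.items.map Prod.fst = d.items.map Prod.fst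
  rw [h, List.map_map]
  rfl

lemma main_invariant (keys cleaned : List String) (hkeys : keys.Nodup) :
    ∀ (subs rem : List String) (d out : PySem.Dict String (List String)),
      rem = keys.filter (fun o => rem.contains o) →
      (∀ o, o ∈ d.keys ↔ (o ∈ keys ∧ o ∉ rem)) →
      d.keys.Nodup →
      (∀ o ∈ rem, cleaned.filter (hitB o) = subs.filter (hitB o)) →
      out.items = d.items.map (fun p => (p.1, p.2 ++ subs.filter (hitB p.1))) →
      (subs.foldl (AstepF keys) d).items = (subs.foldl (BstepF cleaned) (rem, out)).2.items := by
  intro subs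
  induction subs with
  | nil =>
    intro rem d out _ _ _ _ hout
    simp only [List.foldl_nil]
    rw [hout]
    simp
  | cons s subs' ih =>
    intro rem d out hrem hmem hnd hhits hout
    simp only [List.foldl_cons]
    have hremnd : rem.Nodup := by rw [hrem]; exact hkeys.filter _
    have hremsub : ∀ o, o ∈ rem → o ∈ keys := by
      intro o ho
      conv at ho => rw [hrem]
      exact (List.mem_filter.mp ho).1
    have hdsub : ∀ p ∈ d.items, p.1 ∈ keys :=
      fun p hp => ((hmem p.1).mp (PySem.Dict.mem_keys_of_mem_items _ hp)).1
    have hfoundnd : (rem.filter (fun o => hitB o s)).Nodup := hremnd.filter _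
    -- the organizations A newly inserts while processing s are exactly B's matches from the worklist
    have hnew : (keys.filter (fun o => hitB o s)).filter (fun o => !(d.contains o))
        = rem.filter (fun o => hitB o s) := by
      conv_rhs => rw [hrem]
      rw [List.filter_filter, List.filter_filter]
      apply List.filter_congr
      intro o ho
      rw [PySem.Dict.contains_eq_decide_mem_keys]
      by_cases hh : hitB o s = true <;> by_cases hr : o ∈ rem <;>
        simp [hh, hr, hmem o, ho]
    have hkeys' : (AstepF keys d s).keys = d.keys ++ rem.filter (fun o => hitB o s) := by
      rw [keys_AstepF keys d s hkeys hnd, hnew]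
    have hnd' : (AstepF keys d s).keys.Nodup := by
      rw [hkeys', List.nodup_append]
      refine ⟨hnd, hfoundnd, ?_⟩
      intro a ha b hb
      have hbr : b ∈ rem := (List.mem_filter.mp hb).1
      intro hab
      subst hab
      exact ((hmem a).mp ha).2 hbr
    have hmem' : ∀ o, o ∈ (AstepF keys d s).keys ↔ (o ∈ keys ∧ o ∉ rem.filter (fun o => !(hitB o s))) := by
      intro o
      rw [hkeys', List.mem_append, hmem o, List.mem_filter, List.mem_filter]
      constructor
      · rintro (⟨hk, hr⟩ | ⟨hr, hh⟩)
        · exact ⟨hk, fun h => hr h.1⟩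
        · exact ⟨hremsub o hr, fun h => by simp [hh] at h⟩
      · rintro ⟨hk, hnr⟩
        by_cases hr : o ∈ rem
        · refine Or.inr ⟨hr, ?_⟩
          by_cases hh : hitB o s = true
          · exact hh
          · exact absurd ⟨hr, by simpa using hh⟩ hnr
        · exact Or.inl ⟨hk, hr⟩
    have hrem'' : rem.filter (fun o => !(hitB o s))
        = keys.filter (fun o => (rem.filter (fun o => !(hitB o s))).contains o) :=
      filter_stable keys rem _ hrem
    have hhits' : ∀ o ∈ rem.filter (fun o => !(hitB o s)),
        cleaned.filter (hitB o) = subs'.filter (hitB o) := by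
      intro o ho
      have hor : o ∈ rem := (List.mem_filter.mp ho).1
      have hoh : ¬ hitB o s = true := by simpa using (List.mem_filter.mp ho).2
      rw [hhits o hor, List.filter_cons, if_neg hoh]
    have houtkeys : out.keys = d.keys := keys_of_items_map out d _ hout
    have hfresh : ∀ o ∈ rem.filter (fun o => hitB o s), out.contains o = false := by
      intro o ho
      have hor : o ∈ rem := (List.mem_filter.mp ho).1
      rw [PySem.Dict.contains_eq_decide_mem_keys, houtkeys]
      simpa using fun hx => ((hmem o).mp hx).2 hor
    have hout'items : ((rem.filter (fun o => hitB o s)).foldl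
          (fun r o => r.insert o (cleaned.filter (hitB o))) out).items
        = out.items ++ (rem.filter (fun o => hitB o s)).map (fun o => (o, cleaned.filter (hitB o))) := by
      apply PySem.Dict.items_foldl_insert_fresh _ (fun o => o) _ out hfresh
      simpa using hfoundnd
    have hout' : ((rem.filter (fun o => hitB o s)).foldl
          (fun r o => r.insert o (cleaned.filter (hitB o))) out).items
        = (AstepF keys d s).items.map (fun p => (p.1, p.2 ++ subs'.filter (hitB p.1))) := by
      rw [hout'items, hout, items_AstepF keys d s hkeys hnd, hnew, List.map_append, List.map_map]
      congr 1
      · apply List.map_congr_left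
        intro p hp
        have hpk : p.1 ∈ keys := hdsub p hp
        simp only [Function.comp_apply]
        by_cases hh : hitB p.1 s = true
        · have hms : (keys.filter (fun o => hitB o s)).contains p.1 = true := by
            simp [List.mem_filter, hpk, hh]
          rw [if_pos hms]
          rw [List.filter_cons, if_pos hh]
          simp
        · have hms : ¬ (keys.filter (fun o => hitB o s)).contains p.1 = true := by
            simp [List.mem_filter, hh]
          rw [if_neg hms]
          rw [List.filter_cons, if_neg hh]
      · rw [List.map_map]
        apply List.map_congr_left
        intro o ho
        have hor : o ∈ rem := (List.mem_filter.mp ho).1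
        have hoh : hitB o s = true := by simpa using (List.mem_filter.mp ho).2
        simp only [Function.comp_apply]
        rw [hhits o hor, List.filter_cons, if_pos hoh]
        simp
    exact ih (rem.filter (fun o => !(hitB o s))) (AstepF keys d s) _ hrem'' hmem' hnd' hhits' hout' 

-- ===== VERDICT (by name: the statement is the Claim_ definition above) =====
theorem find_subsectors_spec : Claim_equal_find_subsectors := by
  intro organizations cleaned _
  unfold Spec_find_subsectors
  rw [alt_eq_foldl_BstepF]
  show (cleaned.foldl (AstepF ((PySem.Dict.ofList organizations).keys)) PySem.Dict.empty).items = _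
  apply main_invariant _ _ (PySem.Dict.nodup_keys_ofList organizations)
  · exact (List.filter_eq_self.mpr (fun a ha => by simpa using ha)).symm
  · intro o
    simp [PySem.Dict.keys_empty]
  · simp [PySem.Dict.keys_empty]
  · exact fun o _ => rfl
  · rfl
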